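-- pv_equiv track=rewrite | github.com/sreeramganesh/AI-Based-Cognitive-Screening-System-for-Early-Dementia-Detection | app.py | score_tasks
-- ===== SOURCE A (Python) =====
-- def score_tasks(answers):
--     scores = {}
--     def word_count_score(text):
--         wc = len(text.split())
--         if wc > 20:
--             return 10
--         elif wc > 10:
--             return 7
--         elif wc > 5:
--             return 4
--         else:
--             return 2
--     scores["Picture Description Task"] = word_count_score(
--         answers.get("Picture Description Task", "")
--     )
--     scores["Story Reading and Word Repetition Detection"] = (
--         10 if "umbrella" in answers.get(
--             "Story Reading and Word Repetition Detection", "").lower() else 5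
--     )
--     scores["Word Fluency Test"] = (
--         10 if answers.get("Word Fluency Test", "") else 5
--     )
--     scores["Visual Memory"] = (
--         10 if answers.get("Visual Memory", "").upper() == "B" else 5
--     )
--     scores["Problem-Solving and Conditional Logic"] = (
--         10 if "5" in answers.get(
--             "Problem-Solving and Conditional Logic", "") else 5
--     )
--     scores["Object-Location Recall"] = word_count_score(
--         answers.get("Object-Location Recall", "")
--     )
--     scores["Sentence Repetition Task"] = (
--         10 if "quick brown fox" in answers.get(
--             "Sentence Repetition Task", "").lower() else 5
--     )
--     scores["Critical Thinking Scenario"] = (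
--         10 if any(w in answers.get(
--             "Critical Thinking Scenario", "").lower()
--                 for w in ["call", "run", "safe", "help"]) else 5
--     )
--     scores["Delayed Recall Task"] = (
--         10 if "umbrella" in answers.get(
--             "Delayed Recall Task", "").lower() else 5
--     )
--     scores["Pattern Continuation and Logical Reasoning Task"] = (
--         10 if answers.get(
--             "Pattern Continuation and Logical Reasoning Task", "") else 5
--     )
--     features = [
--         scores["Picture Description Task"],
--         scores["Story Reading and Word Repetition Detection"],
--         scores["Word Fluency Test"],
--         scores["Visual Memory"],
--         scores["Problem-Solving and Conditional Logic"],
--         scores["Object-Location Recall"],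
--         scores["Sentence Repetition Task"],
--         scores["Critical Thinking Scenario"],
--         scores["Delayed Recall Task"],
--         scores["Pattern Continuation and Logical Reasoning Task"],
--     ]
--
--     return scores, features
-- ===== SOURCE B (Python) =====
-- FIELD_DEFAULTS = [
--     ("Picture Description Task", 2),
--     ("Story Reading and Word Repetition Detection", 5),
--     ("Word Fluency Test", 5),
--     ("Visual Memory", 5),
--     ("Problem-Solving and Conditional Logic", 5),
--     ("Object-Location Recall", 2),
--     ("Sentence Repetition Task", 5),
--     ("Critical Thinking Scenario", 5),
--     ("Delayed Recall Task", 5),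
--     ("Pattern Continuation and Logical Reasoning Task", 5),
-- ]
--
--
-- def _score_one(name, text):
--     """Score a single known field; None for unrecognized keys."""
--     if name in ("Picture Description Task", "Object-Location Recall"):
--         wc = len(text.split())
--         return 10 if wc > 20 else 7 if wc > 10 else 4 if wc > 5 else 2
--     if name in ("Word Fluency Test",
--                 "Pattern Continuation and Logical Reasoning Task"):
--         return 10 if text else 5
--     if name == "Visual Memory":
--         return 10 if text.upper() == "B" else 5
--     if name == "Problem-Solving and Conditional Logic":
--         return 10 if "5" in text else 5
--     if name == "Sentence Repetition Task":
--         return 10 if "quick brown fox" in text.lower() else 5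
--     if name == "Critical Thinking Scenario":
--         return 10 if any(w in text.lower()
--                          for w in ("call", "run", "safe", "help")) else 5
--     if name in ("Story Reading and Word Repetition Detection",
--                 "Delayed Recall Task"):
--         return 10 if "umbrella" in text.lower() else 5
--     return None
--
--
-- def score_tasks(answers):
--     # Single pass over whatever the caller actually answered.
--     found = {}
--     for name, text in answers.items():
--         s = _score_one(name, text)
--         if s is not None:
--             found[name] = s
--     # Read the ten fields back in the canonical order; a missing field gets
--     # its precomputed empty-answer default.
--     features = [found.get(name, default) for name, default in FIELD_DEFAULTS]
--     scores = dict(zip((name for name, _ in FIELD_DEFAULTS), features))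
--     return scores, features
-- ===== Notes on version B (the rewrite author's own statement) =====
-- stated objective: alternative
-- what changed: Instead of ten unrolled answers.get(field,'') lookups, B scans the supplied answers dict once, scoring each recognised key into a found dict, then assembles features by reading the ten canonical fields back with precomputed empty-answer defaults and builds scores as dict(zip(fields, features)); Pre_ excludes association lists with duplicate keys, which cannot arise from the Python dict argument and on which first-vs-last occurrence choice is accidental.
import Mathlib
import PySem

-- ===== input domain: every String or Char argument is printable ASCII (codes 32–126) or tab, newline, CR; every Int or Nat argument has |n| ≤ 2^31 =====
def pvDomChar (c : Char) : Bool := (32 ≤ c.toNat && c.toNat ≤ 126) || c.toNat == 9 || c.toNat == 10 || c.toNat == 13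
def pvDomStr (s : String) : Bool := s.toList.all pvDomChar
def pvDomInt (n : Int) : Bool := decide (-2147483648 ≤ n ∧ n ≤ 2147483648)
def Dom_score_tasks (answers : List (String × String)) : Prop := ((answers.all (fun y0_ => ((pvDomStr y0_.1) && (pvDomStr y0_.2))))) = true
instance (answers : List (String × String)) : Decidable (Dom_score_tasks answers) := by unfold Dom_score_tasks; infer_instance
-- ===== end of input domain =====

-- Header: instead of A's ten unrolled lookups-with-default, B makes ONE pass over the answers
-- the caller actually gave, scoring each recognised key, then reads the ten canonical fields
-- back with precomputed empty-answer defaults (objective: alternative; return value only).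

-- ===== PORT A =====
-- the nested word_count_score helper of A
def pvWcScoreA (text : String) : Int :=
  let wc := (PySem.Str.split₀ text).length
  if wc > 20 then 10 else if wc > 10 then 7 else if wc > 5 then 4 else 2

def score_tasks (answers : List (String × String)) : (List (String × Int)) × List Int :=
  let a : PySem.Dict String String := PySem.Dict.mk answers
  let scores : PySem.Dict String Int := PySem.Dict.empty
  let scores := scores.insert "Picture Description Task"
    (pvWcScoreA (a.getD "Picture Description Task" ""))
  let scores := scores.insert "Story Reading and Word Repetition Detection"
    (if PySem.Str.isIn "umbrella" (PySem.Str.lower (a.getD "Story Reading and Word Repetition Detection" "")) then 10 else 5)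
  let scores := scores.insert "Word Fluency Test"
    (if a.getD "Word Fluency Test" "" ≠ "" then 10 else 5)
  let scores := scores.insert "Visual Memory"
    (if PySem.Str.upper (a.getD "Visual Memory" "") = "B" then 10 else 5)
  let scores := scores.insert "Problem-Solving and Conditional Logic"
    (if PySem.Str.isIn "5" (a.getD "Problem-Solving and Conditional Logic" "") then 10 else 5)
  let scores := scores.insert "Object-Location Recall"
    (pvWcScoreA (a.getD "Object-Location Recall" ""))
  let scores := scores.insert "Sentence Repetition Task"
    (if PySem.Str.isIn "quick brown fox" (PySem.Str.lower (a.getD "Sentence Repetition Task" "")) then 10 else 5)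
  let scores := scores.insert "Critical Thinking Scenario"
    (if (["call", "run", "safe", "help"].any
        (fun w => PySem.Str.isIn w (PySem.Str.lower (a.getD "Critical Thinking Scenario" "")))) then 10 else 5)
  let scores := scores.insert "Delayed Recall Task"
    (if PySem.Str.isIn "umbrella" (PySem.Str.lower (a.getD "Delayed Recall Task" "")) then 10 else 5)
  let scores := scores.insert "Pattern Continuation and Logical Reasoning Task"
    (if a.getD "Pattern Continuation and Logical Reasoning Task" "" ≠ "" then 10 else 5)
  let features : List Int := [
    scores.getD "Picture Description Task" 0,
    scores.getD "Story Reading and Word Repetition Detection" 0,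
    scores.getD "Word Fluency Test" 0,
    scores.getD "Visual Memory" 0,
    scores.getD "Problem-Solving and Conditional Logic" 0,
    scores.getD "Object-Location Recall" 0,
    scores.getD "Sentence Repetition Task" 0,
    scores.getD "Critical Thinking Scenario" 0,
    scores.getD "Delayed Recall Task" 0,
    scores.getD "Pattern Continuation and Logical Reasoning Task" 0]
  (scores.items, features)

-- ===== PORT B =====
-- B's module-level FIELD_DEFAULTS table
def pvFieldDefaultsB : List (String × Int) := [
  ("Picture Description Task", 2),
  ("Story Reading and Word Repetition Detection", 5),
  ("Word Fluency Test", 5),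
  ("Visual Memory", 5),
  ("Problem-Solving and Conditional Logic", 5),
  ("Object-Location Recall", 2),
  ("Sentence Repetition Task", 5),
  ("Critical Thinking Scenario", 5),
  ("Delayed Recall Task", 5),
  ("Pattern Continuation and Logical Reasoning Task", 5)]

-- B's _score_one helper (None for unrecognised keys)
def pvScoreOneB (name text : String) : Option Int :=
  if name = "Picture Description Task" ∨ name = "Object-Location Recall" then
    let wc := (PySem.Str.split₀ text).length
    some (if wc > 20 then 10 else if wc > 10 then 7 else if wc > 5 then 4 else 2)
  else if name = "Word Fluency Test" ∨ name = "Pattern Continuation and Logical Reasoning Task" then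
    some (if text ≠ "" then 10 else 5)
  else if name = "Visual Memory" then
    some (if PySem.Str.upper text = "B" then 10 else 5)
  else if name = "Problem-Solving and Conditional Logic" then
    some (if PySem.Str.isIn "5" text then 10 else 5)
  else if name = "Sentence Repetition Task" then
    some (if PySem.Str.isIn "quick brown fox" (PySem.Str.lower text) then 10 else 5)
  else if name = "Critical Thinking Scenario" then
    some (if (["call", "run", "safe", "help"].any
        (fun w => PySem.Str.isIn w (PySem.Str.lower text))) then 10 else 5)
  else if name = "Story Reading and Word Repetition Detection" ∨ name = "Delayed Recall Task" then
    some (if PySem.Str.isIn "umbrella" (PySem.Str.lower text) then 10 else 5)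
  else none

-- one iteration of B's 'for name, text in answers.items()' loop
def pvStepB (found : PySem.Dict String Int) (p : String × String) : PySem.Dict String Int :=
  match pvScoreOneB p.1 p.2 with
  | some s => found.insert p.1 s
  | none => found

def score_tasks_alt (answers : List (String × String)) : (List (String × Int)) × List Int :=
  let found : PySem.Dict String Int :=
    (PySem.Dict.mk answers).items.foldl pvStepB PySem.Dict.empty
  let features : List Int := pvFieldDefaultsB.map (fun fd => found.getD fd.1 fd.2)
  let scores : PySem.Dict String Int :=
    PySem.Dict.mk ((pvFieldDefaultsB.map Prod.fst).zip features)
  (scores.items, features)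

-- ===== PRECONDITION & SPEC =====
-- Pre_ excludes association lists with duplicate keys: the argument is a Python dict (which
-- cannot carry duplicate keys), so such lists represent no real input and the first-vs-last
-- occurrence choice on them is accidental.
def Pre_score_tasks (answers : List (String × String)) : Prop := (answers.map Prod.fst).Nodup
instance (answers : List (String × String)) : Decidable (Pre_score_tasks answers) := by unfold Pre_score_tasks; infer_instance

def pvWitness_score_tasks : List (String × String) :=
  [("Visual Memory", "b"), ("Word Fluency Test", "dog cat")]

def Spec_score_tasks (answers : List (String × String)) (out : (List (String × Int)) × List Int) : Prop := out = score_tasks_alt answers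
instance (answers : List (String × String)) (out : (List (String × Int)) × List Int) : Decidable (Spec_score_tasks answers out) := by unfold Spec_score_tasks; infer_instance

-- ===== CLAIM (what is proved, stated in full; the proofs are below) =====
def Claim_equal_score_tasks : Prop := ∀ (answers : List (String × String)), Dom_score_tasks answers → Pre_score_tasks answers → Spec_score_tasks answers (score_tasks answers)

-- ===== LEMMAS AND PROOFS =====

-- B's loop, read back at key f: on a duplicate-free items list it returns the score of f's
-- entry when present, and leaves the accumulator untouched otherwise.
theorem foldl_pvStepB_get? (l : List (String × String)) (acc : PySem.Dict String Int)
    (f : String) (hn : (l.map Prod.fst).Nodup) :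
    (l.foldl pvStepB acc).get? f =
      match l.find? (fun p => p.1 == f) with
      | some p => (match pvScoreOneB f p.2 with
                   | some s => some s
                   | none => acc.get? f)
      | none => acc.get? f := by
  induction l generalizing acc with
  | nil => simp
  | cons hd tl ih =>
    simp only [List.map_cons, List.nodup_cons] at hn
    simp only [List.foldl_cons, List.find?_cons]
    rw [ih _ hn.2]
    by_cases hf : hd.1 = f
    · subst hf
      have htl : tl.find? (fun p => p.1 == hd.1) = none := by
        rw [List.find?_eq_none]
        intro p hp
        simp only [beq_iff_eq]
        intro he
        exact hn.1 (he ▸ List.mem_map_of_mem hp)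
      rw [htl]
      simp only [beq_self_eq_true]
      unfold pvStepB
      cases h : pvScoreOneB hd.1 hd.2 with
      | some s => simp [PySem.Dict.get?_insert_self]
      | none => rfl
    · have hbf : (hd.1 == f) = false := by simp [hf]
      simp only [hbf]
      unfold pvStepB
      cases h : pvScoreOneB hd.1 hd.2 with
      | some s =>
        rw [PySem.Dict.get?_insert_of_ne acc s (fun he => hf he.symm)]
      | none => rfl

-- per-field bridge: B's found-dict readback equals A's "score the .get(f, '') value"
theorem found_getD_eq (l : List (String × String)) (hn : (l.map Prod.fst).Nodup)
    (f : String) (df : Int) (sc : String → Int)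
    (hsc : ∀ v, pvScoreOneB f v = some (sc v)) (hdf : sc "" = df) :
    ((PySem.Dict.mk l).items.foldl pvStepB PySem.Dict.empty).getD f df =
      sc ((PySem.Dict.mk l).getD f "") := by
  have hitems : (PySem.Dict.mk l).items = l := rfl
  rw [PySem.Dict.getD, PySem.Dict.getD, hitems, foldl_pvStepB_get? l _ f hn]
  have hget : (PySem.Dict.mk l).get? f = Option.map (fun p => p.2) (l.find? (fun p => p.1 == f)) := rfl
  rw [hget]
  cases h : l.find? (fun p => p.1 == f) with
  | none => simpa using hdf.symm
  | some p => simp [hsc p.2]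

-- ===== VERDICT (by name: the statement is the Claim_ definition above) =====
set_option maxHeartbeats 2000000 in
theorem score_tasks_spec : Claim_equal_score_tasks := by
  intro answers _ hpre
  unfold Spec_score_tasks score_tasks_alt
  simp only [pvFieldDefaultsB, List.map_cons, List.map_nil, List.zip_cons_cons, List.zip_nil_right]
  rw [found_getD_eq answers hpre _ _ (fun v => pvWcScoreA v) (fun v => rfl) (by decide)]
  rw [found_getD_eq answers hpre _ _
    (fun v => if PySem.Str.isIn "umbrella" (PySem.Str.lower v) then 10 else 5)
    (fun v => rfl) (by decide)]
  rw [found_getD_eq answers hpre _ _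
    (fun v => if v ≠ "" then 10 else 5) (fun v => rfl) (by decide)]
  rw [found_getD_eq answers hpre _ _
    (fun v => if PySem.Str.upper v = "B" then 10 else 5) (fun v => rfl) (by decide)]
  rw [found_getD_eq answers hpre _ _
    (fun v => if PySem.Str.isIn "5" v then 10 else 5) (fun v => rfl) (by decide)]
  rw [found_getD_eq answers hpre _ _ (fun v => pvWcScoreA v) (fun v => rfl) (by decide)]
  rw [found_getD_eq answers hpre _ _
    (fun v => if PySem.Str.isIn "quick brown fox" (PySem.Str.lower v) then 10 else 5)
    (fun v => rfl) (by decide)]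
  rw [found_getD_eq answers hpre _ _
    (fun v => if (["call", "run", "safe", "help"].any
        (fun w => PySem.Str.isIn w (PySem.Str.lower v))) then 10 else 5)
    (fun v => rfl) (by decide)]
  rw [found_getD_eq answers hpre _ _
    (fun v => if PySem.Str.isIn "umbrella" (PySem.Str.lower v) then 10 else 5)
    (fun v => rfl) (by decide)]
  rw [found_getD_eq answers hpre _ _
    (fun v => if v ≠ "" then 10 else 5) (fun v => rfl) (by decide)]
  unfold score_tasks
  simp only [PySem.Dict.getD_insert, String.reduceEq, reduceIte]
  rfl
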